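-- pv_equiv track=rewrite | github.com/0rsted/eyefi-config | python-implementation/eyefi.py | octal_esc_to_chr
-- ===== SOURCE A (Python) =====
-- def atoo(o):
--   """
--   Convert an octal character to its integer value.
--
--   Args:
--     o (str): A single character representing an octal digit.
--
--   Returns:
--     int: The integer value of the octal character, or -1 if invalid.
--   """
--   if '0' <= o <= '7':
--     return int(o, 8)
--   return -1
--
-- def octal_esc_to_chr(input_str):
--   """
--   Convert an octal escape sequence to a character.
--
--   Args:
--     input_str (str): The input string containing the octal escape sequence.
--
--   Returns:
--     int: The character value, or -1 if invalid.
--   """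
--   if input_str[0] != '\\' or len(input_str) < 4:
--     return -1
--   ret = 0
--   for i in range(1, 4):
--     tmp = atoo(input_str[i])
--     if tmp < 0:
--       return tmp
--     ret = (ret << 3) + tmp
--   return ret
-- ===== SOURCE B (Python) =====
-- def octal_esc_to_chr(input_str):
--   """
--   Convert an octal escape sequence to a character.
--
--   Simpler re-implementation: validate the 3-char slice wholesale,
--   then convert it with the library base-8 parser instead of a
--   manual shift-and-add loop.
--   """
--   if input_str[0] != '\\' or len(input_str) < 4:
--     return -1
--   digits = input_str[1:4]
--   if not all('0' <= c <= '7' for c in digits):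
--     return -1
--   return int(digits, 8)
-- ===== Notes on version B (the rewrite author's own statement) =====
-- stated objective: simpler
-- what changed: Replaces the Horner shift-accumulate loop with per-index atoo calls and early returns by a whole-slice validation of input_str[1:4] followed by one library base-8 conversion int(digits, 8).
import Mathlib
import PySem

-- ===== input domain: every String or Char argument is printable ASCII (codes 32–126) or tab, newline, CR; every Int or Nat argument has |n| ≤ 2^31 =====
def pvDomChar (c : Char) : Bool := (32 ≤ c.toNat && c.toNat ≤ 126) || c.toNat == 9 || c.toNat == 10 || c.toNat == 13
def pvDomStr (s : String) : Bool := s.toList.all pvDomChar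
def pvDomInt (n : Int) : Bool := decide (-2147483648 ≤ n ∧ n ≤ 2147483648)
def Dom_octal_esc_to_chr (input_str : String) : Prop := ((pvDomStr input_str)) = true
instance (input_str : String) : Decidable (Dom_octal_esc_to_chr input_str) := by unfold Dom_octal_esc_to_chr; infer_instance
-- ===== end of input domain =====

-- B replaces A's early-return Horner shift-accumulate loop by a whole-slice validation of
-- input_str[1:4] followed by one library base-8 conversion (objective: simpler).

-- ===== PORT A =====
-- atoo: '0' <= o <= '7' guard, then int(o, 8)
def pvAtoo (o : Char) : Int :=
  if '0' ≤ o ∧ o ≤ '7' then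
    -- int(o, 8): under the guard the parse always succeeds, so .getD is never the default
    (PySem.Int.ofCharsBase? [o] 8).getD (-1)
  else -1

-- the 'for i in range(1, 4)' loop with its early return on tmp < 0;
-- input_str[i] is always in range here (the caller checked len >= 4), so pyGetD is exact
def pvLoopA (cs : List Char) : List Int → Int → Int
  | [], ret => ret
  | i :: is, ret =>
    let tmp := pvAtoo (PySem.List.pyGetD cs i ' ')
    if tmp < 0 then tmp else pvLoopA cs is ((ret <<< 3) + tmp)

def pvACore (cs : List Char) : Int :=
  match PySem.List.pyGet? cs 0 with
  | none => -1   -- input_str[0] raises IndexError in Python; excluded by Pre_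
  | some c0 =>
    if c0 ≠ '\\' ∨ PySem.List.len cs < 4 then -1
    else pvLoopA cs (PySem.List.pyRange 1 4 1) 0

def octal_esc_to_chr (input_str : String) : Int := pvACore input_str.toList

-- ===== PORT B =====
def pvBCore (cs : List Char) : Int :=
  match PySem.List.pyGet? cs 0 with
  | none => -1   -- input_str[0] raises IndexError in Python; excluded by Pre_
  | some c0 =>
    if c0 ≠ '\\' ∨ PySem.List.len cs < 4 then -1
    else
      let digits := PySem.List.slice cs (some 1) (some 4)
      if ¬ (digits.all fun ch => decide ('0' ≤ ch ∧ ch ≤ '7')) then -1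
      else (PySem.Int.ofCharsBase? digits 8).getD (-1)  -- int(digits, 8); always parses here

def octal_esc_to_chr_alt (input_str : String) : Int := pvBCore input_str.toList

-- ===== PRECONDITION & SPEC =====
-- Pre_ excludes only the empty string, on which A (input_str[0]) raises IndexError.
def Pre_octal_esc_to_chr (input_str : String) : Prop := input_str.toList ≠ []
instance (input_str : String) : Decidable (Pre_octal_esc_to_chr input_str) := by
  unfold Pre_octal_esc_to_chr; infer_instance

def pvWitness_octal_esc_to_chr : String := "\\101"

def Spec_octal_esc_to_chr (input_str : String) (out : Int) : Prop := out = octal_esc_to_chr_alt input_str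
instance (input_str : String) (out : Int) : Decidable (Spec_octal_esc_to_chr input_str out) := by
  unfold Spec_octal_esc_to_chr; infer_instance

-- ===== CLAIM (what is proved, stated in full; the proofs are below) =====
def Claim_equal_octal_esc_to_chr : Prop := ∀ (input_str : String), Dom_octal_esc_to_chr input_str → Pre_octal_esc_to_chr input_str → Spec_octal_esc_to_chr input_str (octal_esc_to_chr input_str)

-- ===== LEMMAS AND PROOFS =====

lemma pv_char_digit (c : Char) (h : '0' ≤ c ∧ c ≤ '7') :
    c = '0' ∨ c = '1' ∨ c = '2' ∨ c = '3' ∨ c = '4' ∨ c = '5' ∨ c = '6' ∨ c = '7' := by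
  obtain ⟨h1, h2⟩ := h
  rw [Char.le_def] at h1 h2
  have h1' : 48 ≤ c.toNat := UInt32.le_iff_toNat_le.mp h1
  have h2' : c.toNat ≤ 55 := UInt32.le_iff_toNat_le.mp h2
  have hc : Char.ofNat c.toNat = c := Char.ofNat_toNat c
  interval_cases h : c.toNat <;> rw [← hc] <;> decide

lemma pv_atoo_nonneg (c : Char) (h : '0' ≤ c ∧ c ≤ '7') : 0 ≤ pvAtoo c := by
  rcases pv_char_digit c h with h|h|h|h|h|h|h|h <;> subst h <;> decide

lemma pv_key (b c d : Char) (hb : '0' ≤ b ∧ b ≤ '7') (hc : '0' ≤ c ∧ c ≤ '7')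
    (hd : '0' ≤ d ∧ d ≤ '7') :
    ((((0:Int) <<< 3 + pvAtoo b) <<< 3 + pvAtoo c) <<< 3 + pvAtoo d)
      = (PySem.Int.ofCharsBase? [b, c, d] 8).getD (-1) := by
  rcases pv_char_digit b hb with h|h|h|h|h|h|h|h <;> subst h <;>
  rcases pv_char_digit c hc with h|h|h|h|h|h|h|h <;> subst h <;>
  rcases pv_char_digit d hd with h|h|h|h|h|h|h|h <;> subst h <;> decide

lemma pv_range14 : PySem.List.pyRange 1 4 1 = [1, 2, 3] := by decide

lemma pv_getD1 (c0 b c d : Char) (t : List Char) :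
    PySem.List.pyGetD (c0 :: b :: c :: d :: t) 1 ' ' = b := by simp [pysem]

lemma pv_getD2 (c0 b c d : Char) (t : List Char) :
    PySem.List.pyGetD (c0 :: b :: c :: d :: t) 2 ' ' = c := by simp [pysem]

lemma pv_getD3 (c0 b c d : Char) (t : List Char) :
    PySem.List.pyGetD (c0 :: b :: c :: d :: t) 3 ' ' = d := by simp [pysem]

lemma pv_slice14 (c0 b c d : Char) (t : List Char) :
    PySem.List.slice (c0 :: b :: c :: d :: t) (some 1) (some 4) = [b, c, d] := by simp [pysem]

lemma pv_core_eq (cs : List Char) (h : cs ≠ []) : pvACore cs = pvBCore cs := by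
  match cs with
  | [] => exact absurd rfl h
  | c0 :: rest =>
    simp only [pvACore, pvBCore, PySem.List.pyGet?_zero_cons]
    by_cases hg : c0 ≠ '\\' ∨ PySem.List.len (c0 :: rest) < 4
    · rw [if_pos hg, if_pos hg]
    · rw [if_neg hg, if_neg hg, pv_range14]
      rcases rest with _ | ⟨b, _ | ⟨c, _ | ⟨d, t⟩⟩⟩
      · exact absurd (Or.inr (by simp [PySem.List.len_eq])) hg
      · exact absurd (Or.inr (by simp [PySem.List.len_eq])) hg
      · exact absurd (Or.inr (by simp [PySem.List.len_eq])) hg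
      · simp only [pvLoopA, pv_getD1, pv_getD2, pv_getD3, pv_slice14]
        by_cases hb : '0' ≤ b ∧ b ≤ '7'
        · rw [if_neg (not_lt.mpr (pv_atoo_nonneg b hb))]
          by_cases hcc : '0' ≤ c ∧ c ≤ '7'
          · rw [if_neg (not_lt.mpr (pv_atoo_nonneg c hcc))]
            by_cases hd : '0' ≤ d ∧ d ≤ '7'
            · rw [if_neg (not_lt.mpr (pv_atoo_nonneg d hd))]
              rw [if_neg (by simp [hb.1, hb.2, hcc.1, hcc.2, hd.1, hd.2])]
              simpa only [pvLoopA] using pv_key b c d hb hcc hd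
            · have hAd : pvAtoo d = -1 := by simp [pvAtoo, hd]
              simp [hAd, hd]
          · have hAc : pvAtoo c = -1 := by simp [pvAtoo, hcc]
            simp [hAc, hcc]
        · have hAb : pvAtoo b = -1 := by simp [pvAtoo, hb]
          simp [hAb, hb]

-- ===== VERDICT (by name: the statement is the Claim_ definition above) =====
theorem octal_esc_to_chr_spec : Claim_equal_octal_esc_to_chr := by
  intro s _ hpre
  unfold Spec_octal_esc_to_chr octal_esc_to_chr octal_esc_to_chr_alt
  exact pv_core_eq s.toList hpre
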